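-- pv_equiv track=rewrite | github.com/monojitgoswami69/codalyzer | examples/algorithms.py | complex_algorithm
-- ===== SOURCE A (Python) =====
-- def binary_search(arr, target):
--     """Binary search for target in sorted array."""
--     left, right = 0, len(arr) - 1
--
--     while left <= right:
--         mid = (left + right) // 2
--
--         if arr[mid] == target:
--             return mid
--         elif arr[mid] < target:
--             left = mid + 1
--         else:
--             right = mid - 1
--
--     return -1
--
-- def complex_algorithm(data, queries):
--     """
--     Process data and answer queries.
--
--     - Building index: O(n)
--     - Each query: O(log n)
--     - Total: O(n + q * log n) where n = len(data), q = len(queries)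
--     """
--     # Build sorted index - O(n log n)
--     sorted_data = sorted(enumerate(data), key=lambda x: x[1])
--     values = [x[1] for x in sorted_data]
--     indices = [x[0] for x in sorted_data]
--
--     results = []
--
--     # Answer each query using binary search - O(q * log n)
--     for query in queries:
--         idx = binary_search(values, query)
--         if idx != -1:
--             results.append(indices[idx])
--         else:
--             results.append(-1)
--
--     return results
-- ===== SOURCE B (Python) =====
-- def complex_algorithm(data, queries):
--     """Answer queries by recursive binary search over the sorted (index, value) pairs."""
--     pairs = sorted(enumerate(data), key=lambda x: x[1])
--
--     def locate(q, lo, hi):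
--         if lo > hi:
--             return -1
--         mid = (lo + hi) // 2
--         i, v = pairs[mid]
--         if v == q:
--             return i
--         if v < q:
--             return locate(q, mid + 1, hi)
--         return locate(q, lo, mid - 1)
--
--     return [locate(q, 0, len(pairs) - 1) for q in queries]
-- ===== Notes on version B (the rewrite author's own statement) =====
-- stated objective: simpler
-- what changed: Replaces the iterative binary search over parallel values/indices arrays plus a position-to-original-index lookup by a recursive divide-and-conquer search over the sorted (index,value) pairs that returns the original index directly, and an append loop by a list comprehension.
import Mathlib
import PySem

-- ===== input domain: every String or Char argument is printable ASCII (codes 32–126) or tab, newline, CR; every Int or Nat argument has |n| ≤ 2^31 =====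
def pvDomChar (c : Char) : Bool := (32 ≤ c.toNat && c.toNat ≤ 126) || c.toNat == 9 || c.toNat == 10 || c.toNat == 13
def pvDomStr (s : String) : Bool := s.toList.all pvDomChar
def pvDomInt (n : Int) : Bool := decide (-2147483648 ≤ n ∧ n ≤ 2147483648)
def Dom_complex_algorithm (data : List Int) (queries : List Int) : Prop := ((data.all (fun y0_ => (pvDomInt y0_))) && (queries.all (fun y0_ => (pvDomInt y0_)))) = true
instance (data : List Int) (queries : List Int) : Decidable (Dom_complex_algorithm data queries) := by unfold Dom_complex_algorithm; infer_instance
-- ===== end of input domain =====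

-- B replaces A's iterative binary search over parallel values/indices arrays (plus the
-- position→original-index lookup) by a recursive search over the sorted (index,value)
-- pairs that returns the original index directly; same midpoint and branch order.

-- ===== PORT A =====
-- while left <= right: … — fuel is only a totality guard: each iteration shrinks the
-- window by at least one, and binary_search starts the fuel above the window size, so
-- the fuel-0 arm is never reached.  The 'none' arm of pyGet? is likewise unreachable
-- for the calls complex_algorithm makes (0 ≤ left, right < len(arr)); this Python raises nowhere.
def binary_search_go (arr : List Int) (target : Int) : Nat → Int → Int → Int
  | 0, _, _ => -1
  | fuel + 1, left, right =>
    if left ≤ right then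
      let mid := PySem.Int.floordiv (left + right) 2
      match PySem.List.pyGet? arr mid with
      | some v =>
        if v = target then mid
        else if v < target then binary_search_go arr target fuel (mid + 1) right
        else binary_search_go arr target fuel left (mid - 1)
      | none => -1
    else -1

def binary_search (arr : List Int) (target : Int) (left right : Int) : Int :=
  binary_search_go arr target ((right + 1 - left).toNat + 1) left right

def complex_algorithm (data : List Int) (queries : List Int) : List Int :=
  let sorted_data := PySem.List.sorted (PySem.List.enumerate data) (fun x => x.2) false
  let values := sorted_data.map (fun x => x.2)
  let indices := sorted_data.map (fun x => x.1)
  queries.foldl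
    (fun results query =>
      let idx := binary_search values query 0 ((values.length : Int) - 1)
      if idx ≠ -1 then results ++ [(PySem.List.pyGet? indices idx).getD (-1)]  -- in range whenever idx ≠ -1
      else results ++ [-1])
    []

-- ===== PORT B =====
-- recursive locate over the sorted pairs; fuel is the same totality guard (started above
-- the window size, never exhausted), and the 'none' arm is unreachable (0 ≤ lo, hi < len(pairs))
def locate_go (pairs : List (Int × Int)) (q : Int) : Nat → Int → Int → Int
  | 0, _, _ => -1
  | fuel + 1, lo, hi =>
    if lo > hi then -1
    else
      let mid := PySem.Int.floordiv (lo + hi) 2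
      match PySem.List.pyGet? pairs mid with
      | some iv =>
        if iv.2 = q then iv.1
        else if iv.2 < q then locate_go pairs q fuel (mid + 1) hi
        else locate_go pairs q fuel lo (mid - 1)
      | none => -1

def locate (pairs : List (Int × Int)) (q lo hi : Int) : Int :=
  locate_go pairs q ((hi + 1 - lo).toNat + 1) lo hi

def complex_algorithm_alt (data : List Int) (queries : List Int) : List Int :=
  let pairs := PySem.List.sorted (PySem.List.enumerate data) (fun x => x.2) false
  queries.map (fun q => locate pairs q 0 ((pairs.length : Int) - 1))

-- ===== PRECONDITION & SPEC =====
def Spec_complex_algorithm (data : List Int) (queries : List Int) (out : List Int) : Prop := out = complex_algorithm_alt data queries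
instance (data : List Int) (queries : List Int) (out : List Int) : Decidable (Spec_complex_algorithm data queries out) := by unfold Spec_complex_algorithm; infer_instance

-- ===== CLAIM (what is proved, stated in full; the proofs are below) =====
def Claim_equal_complex_algorithm : Prop := ∀ (data : List Int) (queries : List Int), Dom_complex_algorithm data queries → Spec_complex_algorithm data queries (complex_algorithm data queries)

-- ===== LEMMAS AND PROOFS =====

-- The recursive pair search equals the iterative search on the value projection followed
-- by the index-projection lookup, on any window with 0 ≤ lo, hi < len(pairs) and
-- sufficient fuel on both sides.
theorem locate_go_eq (pairs : List (Int × Int)) (q : Int) :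
    ∀ (fl fa : Nat) (lo hi : Int), (hi + 1 - lo).toNat < fl → (hi + 1 - lo).toNat < fa →
      0 ≤ lo → hi < (pairs.length : Int) →
      locate_go pairs q fl lo hi =
        (if binary_search_go (pairs.map (fun x => x.2)) q fa lo hi ≠ -1 then
          (PySem.List.pyGet? (pairs.map (fun x => x.1))
            (binary_search_go (pairs.map (fun x => x.2)) q fa lo hi)).getD (-1)
         else -1) := by
  intro fl
  induction fl with
  | zero => intro fa lo hi hfl; omega
  | succ fl ih =>
    intro fa lo hi hfl hfa hl hr
    obtain ⟨fa', rfl⟩ : ∃ fa', fa = fa' + 1 := ⟨fa - 1, by omega⟩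
    rw [locate_go, binary_search_go]
    by_cases hle : lo ≤ hi
    · have hmid := PySem.Int.floordiv_two_mid_bounds hle
      have h0 : 0 ≤ PySem.Int.floordiv (lo + hi) 2 := by omega
      have h1 : PySem.Int.floordiv (lo + hi) 2 < (pairs.length : Int) := by omega
      have h1' : PySem.Int.floordiv (lo + hi) 2 < ((pairs.map (fun x => x.2)).length : Int) := by
        simpa using h1
      rw [if_neg (by omega : ¬ lo > hi), if_pos hle]
      simp only [PySem.List.pyGet?_eq_some_getElem pairs h0 h1,
        PySem.List.pyGet?_eq_some_getElem (pairs.map (fun x => x.2)) h0 h1',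
        List.getElem_map]
      by_cases hv1 : pairs[(PySem.Int.floordiv (lo + hi) 2).toNat].2 = q
      · -- found: A returns mid, then looks it up in the index projection
        rw [if_pos hv1, if_pos hv1,
          if_pos (by omega : ¬ PySem.Int.floordiv (lo + hi) 2 = -1),
          PySem.List.pyGet?_eq_some_getElem (pairs.map (fun x => x.1)) h0 (by simpa using h1)]
        simp
      · rw [if_neg hv1, if_neg hv1]
        by_cases hv2 : pairs[(PySem.Int.floordiv (lo + hi) 2).toNat].2 < q
        · rw [if_pos hv2, if_pos hv2]
          exact ih fa' (PySem.Int.floordiv (lo + hi) 2 + 1) hi (by omega) (by omega)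
            (by omega) hr
        · rw [if_neg hv2, if_neg hv2]
          exact ih fa' lo (PySem.Int.floordiv (lo + hi) 2 - 1) (by omega) (by omega)
            hl (by omega)
    · rw [if_pos (by omega : lo > hi), if_neg hle]
      simp

-- The query loop, over any sorted pair list, equals B's map of the recursive search.
theorem loop_eq_map (pairs : List (Int × Int)) (queries : List Int) :
    queries.foldl
      (fun results query =>
        let idx := binary_search (pairs.map (fun x => x.2)) query 0
          (((pairs.map (fun x => x.2)).length : Int) - 1)
        if idx ≠ -1 then
          results ++ [(PySem.List.pyGet? (pairs.map (fun x => x.1)) idx).getD (-1)]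
        else results ++ [-1]) []
      = queries.map (fun q => locate pairs q 0 ((pairs.length : Int) - 1)) := by
  have hbody :
      (fun (results : List Int) (query : Int) =>
        let idx := binary_search (pairs.map (fun x => x.2)) query 0
          (((pairs.map (fun x => x.2)).length : Int) - 1)
        if idx ≠ -1 then
          results ++ [(PySem.List.pyGet? (pairs.map (fun x => x.1)) idx).getD (-1)]
        else results ++ [-1]) =
      (fun results query => results ++
        [if binary_search (pairs.map (fun x => x.2)) query 0
            (((pairs.map (fun x => x.2)).length : Int) - 1) ≠ -1 then
          (PySem.List.pyGet? (pairs.map (fun x => x.1))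
            (binary_search (pairs.map (fun x => x.2)) query 0
              (((pairs.map (fun x => x.2)).length : Int) - 1))).getD (-1)
         else -1]) := by
    funext r qu; dsimp only; split_ifs <;> rfl
  rw [hbody, PySem.List.foldl_append_singleton_eq_map, List.nil_append]
  refine List.map_congr_left ?_
  intro qu _
  rw [locate, binary_search, List.length_map]
  exact locate_go_eq pairs qu ((((pairs.length : Int) - 1) + 1 - 0).toNat + 1)
    ((((pairs.length : Int) - 1) + 1 - 0).toNat + 1) 0 ((pairs.length : Int) - 1)
    (by omega) (by omega) (by omega) (by omega) |>.symm

-- ===== VERDICT (by name: the statement is the Claim_ definition above) =====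
theorem complex_algorithm_spec : Claim_equal_complex_algorithm := by
  intro data queries _
  unfold Spec_complex_algorithm complex_algorithm complex_algorithm_alt
  dsimp only
  exact loop_eq_map (PySem.List.sorted (PySem.List.enumerate data) (fun x => x.2) false) queries
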